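-- pv_equiv track=rewrite | github.com/arwooy/glassnode_analysis | generate_complete_glassnode_docs.py | group_endpoints_by_subcategory
-- ===== SOURCE A (Python) =====
-- from collections import defaultdict
-- from typing import Dict, List, Any
--
-- def group_endpoints_by_subcategory(endpoints: List[Dict]) -> Dict[str, List[Dict]]:
--     """按子类别对端点进行分组"""
--     subcategories = defaultdict(list)
--
--     for endpoint in endpoints:
--         metric = endpoint.get('metric', '')
--
--         # 尝试识别子类别
--         if 'active' in metric or 'activity' in metric:
--             subcategories['active'].append(endpoint)
--         elif 'min_' in metric:
--             subcategories['min'].append(endpoint)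
--         elif 'profit' in metric:
--             subcategories['profit'].append(endpoint)
--         elif 'loss' in metric:
--             subcategories['loss'].append(endpoint)
--         elif 'accumulation' in metric:
--             subcategories['accumulation'].append(endpoint)
--         elif 'supply' in metric:
--             subcategories['supply'].append(endpoint)
--         elif 'balance' in metric:
--             subcategories['balance'].append(endpoint)
--         elif 'holder' in metric:
--             subcategories['holder'].append(endpoint)
--         elif 'sending' in metric:
--             subcategories['sending'].append(endpoint)
--         elif 'receiving' in metric:
--             subcategories['receiving'].append(endpoint)
--         elif 'new' in metric:
--             subcategories['new'].append(endpoint)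
--         elif 'non_zero' in metric:
--             subcategories['non'].append(endpoint)
--         elif 'zero' in metric:
--             subcategories['zero'].append(endpoint)
--         elif 'count' in metric:
--             subcategories['count'].append(endpoint)
--         else:
--             # 使用第一个下划线前的部分作为子类别
--             if '_' in metric:
--                 prefix = metric.split('_')[0]
--                 subcategories[prefix].append(endpoint)
--             else:
--                 subcategories['other'].append(endpoint)
--
--     return dict(subcategories)
-- ===== SOURCE B (Python) =====
-- RULES = [
--     (('active', 'activity'), 'active'),
--     (('min_',), 'min'),
--     (('profit',), 'profit'),
--     (('loss',), 'loss'),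
--     (('accumulation',), 'accumulation'),
--     (('supply',), 'supply'),
--     (('balance',), 'balance'),
--     (('holder',), 'holder'),
--     (('sending',), 'sending'),
--     (('receiving',), 'receiving'),
--     (('new',), 'new'),
--     (('non_zero',), 'non'),
--     (('zero',), 'zero'),
--     (('count',), 'count'),
-- ]
--
--
-- def _label(metric):
--     for patterns, label in RULES:
--         if any(p in metric for p in patterns):
--             return label
--     return metric.split('_')[0] if '_' in metric else 'other'
--
--
-- def group_endpoints_by_subcategory(endpoints):
--     # staged passes: label every endpoint, list the distinct labels in first-
--     # appearance order, then collect each group with one filter per label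
--     labels = [_label(e.get('metric', '')) for e in endpoints]
--     order = list(dict.fromkeys(labels))
--     return {lab: [e for e, l in zip(endpoints, labels) if l == lab]
--             for lab in order}
-- ===== Notes on version B (the rewrite author's own statement) =====
-- stated objective: alternative
-- what changed: Replaces A's single pass that accumulates groups in a defaultdict under a 15-branch if/elif cascade with staged passes: label every endpoint via an ordered rules table, take the distinct labels in first-appearance order with dict.fromkeys, then build each group by one filter over the zipped (endpoint, label) list.
import Mathlib
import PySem

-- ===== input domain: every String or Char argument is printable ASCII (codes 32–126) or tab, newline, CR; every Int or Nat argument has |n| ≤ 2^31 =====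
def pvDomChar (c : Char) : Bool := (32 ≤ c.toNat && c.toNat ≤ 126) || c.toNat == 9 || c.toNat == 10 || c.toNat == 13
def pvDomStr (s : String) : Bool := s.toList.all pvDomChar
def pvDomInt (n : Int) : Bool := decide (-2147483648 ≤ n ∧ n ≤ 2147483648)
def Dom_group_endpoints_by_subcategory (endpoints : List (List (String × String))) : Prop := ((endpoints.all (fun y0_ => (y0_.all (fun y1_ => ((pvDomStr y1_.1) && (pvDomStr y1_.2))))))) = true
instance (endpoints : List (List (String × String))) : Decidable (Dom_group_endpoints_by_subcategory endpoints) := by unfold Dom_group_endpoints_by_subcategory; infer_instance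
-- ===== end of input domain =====

-- B replaces A's one-pass defaultdict accumulation under a 15-branch if/elif cascade with
-- three staged passes: a label per endpoint, the distinct labels in first-appearance order,
-- then one filter per label (objective: alternative). Return-value equivalence only.

-- ===== PORT A =====
-- one loop iteration of A: the if/elif cascade, appending via defaultdict semantics
def pvAStep (d : PySem.Dict String (List (List (String × String))))
    (endpoint : List (String × String)) : PySem.Dict String (List (List (String × String))) :=
  let ep := PySem.Dict.ofList endpoint
  let metric := ep.getD "metric" ""
  let e := ep.items
  if PySem.Str.isIn "active" metric || PySem.Str.isIn "activity" metric then
    d.modify "active" [] (· ++ [e])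
  else if PySem.Str.isIn "min_" metric then d.modify "min" [] (· ++ [e])
  else if PySem.Str.isIn "profit" metric then d.modify "profit" [] (· ++ [e])
  else if PySem.Str.isIn "loss" metric then d.modify "loss" [] (· ++ [e])
  else if PySem.Str.isIn "accumulation" metric then d.modify "accumulation" [] (· ++ [e])
  else if PySem.Str.isIn "supply" metric then d.modify "supply" [] (· ++ [e])
  else if PySem.Str.isIn "balance" metric then d.modify "balance" [] (· ++ [e])
  else if PySem.Str.isIn "holder" metric then d.modify "holder" [] (· ++ [e])
  else if PySem.Str.isIn "sending" metric then d.modify "sending" [] (· ++ [e])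
  else if PySem.Str.isIn "receiving" metric then d.modify "receiving" [] (· ++ [e])
  else if PySem.Str.isIn "new" metric then d.modify "new" [] (· ++ [e])
  else if PySem.Str.isIn "non_zero" metric then d.modify "non" [] (· ++ [e])
  else if PySem.Str.isIn "zero" metric then d.modify "zero" [] (· ++ [e])
  else if PySem.Str.isIn "count" metric then d.modify "count" [] (· ++ [e])
  else if PySem.Str.isIn "_" metric then
    -- metric.split('_')[0]; sep "_" ≠ "" so split? is some, and the result is nonempty
    d.modify (PySem.List.pyGetD ((PySem.Str.split? metric "_").getD []) 0 "") [] (· ++ [e])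
  else d.modify "other" [] (· ++ [e])

def group_endpoints_by_subcategory (endpoints : List (List (String × String))) :
    List (String × List (List (String × String))) :=
  (endpoints.foldl pvAStep PySem.Dict.empty).items

-- ===== PORT B =====
-- the ordered rules table of Source B
def pvRules : List (List String × String) :=
  [ (["active", "activity"], "active"), (["min_"], "min"), (["profit"], "profit"),
    (["loss"], "loss"), (["accumulation"], "accumulation"), (["supply"], "supply"),
    (["balance"], "balance"), (["holder"], "holder"), (["sending"], "sending"),
    (["receiving"], "receiving"), (["new"], "new"), (["non_zero"], "non"),
    (["zero"], "zero"), (["count"], "count") ]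

-- _label(metric): first rule whose any pattern occurs in metric, else the prefix fallback
def pvLabel (metric : String) : String :=
  match pvRules.find? (fun r => r.1.any (fun p => PySem.Str.isIn p metric)) with
  | some r => r.2
  | none =>
    if PySem.Str.isIn "_" metric then
      PySem.List.pyGetD ((PySem.Str.split? metric "_").getD []) 0 ""
    else "other"

-- staged passes of Source B: labels, first-appearance order (dict.fromkeys), one filter per label
def group_endpoints_by_subcategory_alt (endpoints : List (List (String × String))) :
    List (String × List (List (String × String))) :=
  let labels := endpoints.map (fun e => pvLabel ((PySem.Dict.ofList e).getD "metric" ""))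
  let order := PySem.List.dedup labels
  order.map (fun lab =>
    (lab, ((endpoints.zip labels).filter (fun p => p.2 == lab)).map
      (fun p => (PySem.Dict.ofList p.1).items)))

-- ===== PRECONDITION & SPEC =====
def Spec_group_endpoints_by_subcategory (endpoints : List (List (String × String))) (out : List (String × List (List (String × String)))) : Prop := out = group_endpoints_by_subcategory_alt endpoints
instance (endpoints : List (List (String × String))) (out : List (String × List (List (String × String)))) : Decidable (Spec_group_endpoints_by_subcategory endpoints out) := by unfold Spec_group_endpoints_by_subcategory; infer_instance

-- ===== CLAIM (what is proved, stated in full; the proofs are below) =====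
def Claim_equal_group_endpoints_by_subcategory : Prop := ∀ (endpoints : List (List (String × String))), Dom_group_endpoints_by_subcategory endpoints → Spec_group_endpoints_by_subcategory endpoints (group_endpoints_by_subcategory endpoints)

-- ===== LEMMAS AND PROOFS =====
-- proof-side helper: the label A's if/elif cascade assigns to a metric
def pvCascadeLabel (metric : String) : String :=
  if PySem.Str.isIn "active" metric || PySem.Str.isIn "activity" metric then "active"
  else if PySem.Str.isIn "min_" metric then "min"
  else if PySem.Str.isIn "profit" metric then "profit"
  else if PySem.Str.isIn "loss" metric then "loss"
  else if PySem.Str.isIn "accumulation" metric then "accumulation"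
  else if PySem.Str.isIn "supply" metric then "supply"
  else if PySem.Str.isIn "balance" metric then "balance"
  else if PySem.Str.isIn "holder" metric then "holder"
  else if PySem.Str.isIn "sending" metric then "sending"
  else if PySem.Str.isIn "receiving" metric then "receiving"
  else if PySem.Str.isIn "new" metric then "new"
  else if PySem.Str.isIn "non_zero" metric then "non"
  else if PySem.Str.isIn "zero" metric then "zero"
  else if PySem.Str.isIn "count" metric then "count"
  else if PySem.Str.isIn "_" metric then
    PySem.List.pyGetD ((PySem.Str.split? metric "_").getD []) 0 ""
  else "other"

-- the label and (label, normalized endpoint) pair of one endpoint, for the proofs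
def pvKey (e : List (String × String)) : String :=
  pvCascadeLabel ((PySem.Dict.ofList e).getD "metric" "")

def pvPairs (endpoints : List (List (String × String))) :
    List (String × List (String × String)) :=
  endpoints.map (fun e => (pvKey e, (PySem.Dict.ofList e).items))

-- A's cascade is one defaultdict-append at the cascade label
theorem pvAStep_eq_modify (d : PySem.Dict String (List (List (String × String))))
    (e : List (String × String)) :
    pvAStep d e = d.modify (pvKey e) [] (· ++ [(PySem.Dict.ofList e).items]) := by
  unfold pvAStep pvKey pvCascadeLabel
  by_cases h1 : (PySem.Str.isIn "active" ((PySem.Dict.ofList e).getD "metric" "") || PySem.Str.isIn "activity" ((PySem.Dict.ofList e).getD "metric" "")) = true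
  · simp only [h1, if_true]
  rw [Bool.not_eq_true] at h1
  simp only [h1, Bool.false_eq_true, if_false]
  by_cases h2 : PySem.Str.isIn "min_" ((PySem.Dict.ofList e).getD "metric" "") = true
  · simp only [h2, if_true]
  rw [Bool.not_eq_true] at h2
  simp only [h2, Bool.false_eq_true, if_false]
  by_cases h3 : PySem.Str.isIn "profit" ((PySem.Dict.ofList e).getD "metric" "") = true
  · simp only [h3, if_true]
  rw [Bool.not_eq_true] at h3
  simp only [h3, Bool.false_eq_true, if_false]
  by_cases h4 : PySem.Str.isIn "loss" ((PySem.Dict.ofList e).getD "metric" "") = true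
  · simp only [h4, if_true]
  rw [Bool.not_eq_true] at h4
  simp only [h4, Bool.false_eq_true, if_false]
  by_cases h5 : PySem.Str.isIn "accumulation" ((PySem.Dict.ofList e).getD "metric" "") = true
  · simp only [h5, if_true]
  rw [Bool.not_eq_true] at h5
  simp only [h5, Bool.false_eq_true, if_false]
  by_cases h6 : PySem.Str.isIn "supply" ((PySem.Dict.ofList e).getD "metric" "") = true
  · simp only [h6, if_true]
  rw [Bool.not_eq_true] at h6
  simp only [h6, Bool.false_eq_true, if_false]
  by_cases h7 : PySem.Str.isIn "balance" ((PySem.Dict.ofList e).getD "metric" "") = true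
  · simp only [h7, if_true]
  rw [Bool.not_eq_true] at h7
  simp only [h7, Bool.false_eq_true, if_false]
  by_cases h8 : PySem.Str.isIn "holder" ((PySem.Dict.ofList e).getD "metric" "") = true
  · simp only [h8, if_true]
  rw [Bool.not_eq_true] at h8
  simp only [h8, Bool.false_eq_true, if_false]
  by_cases h9 : PySem.Str.isIn "sending" ((PySem.Dict.ofList e).getD "metric" "") = true
  · simp only [h9, if_true]
  rw [Bool.not_eq_true] at h9
  simp only [h9, Bool.false_eq_true, if_false]
  by_cases h10 : PySem.Str.isIn "receiving" ((PySem.Dict.ofList e).getD "metric" "") = true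
  · simp only [h10, if_true]
  rw [Bool.not_eq_true] at h10
  simp only [h10, Bool.false_eq_true, if_false]
  by_cases h11 : PySem.Str.isIn "new" ((PySem.Dict.ofList e).getD "metric" "") = true
  · simp only [h11, if_true]
  rw [Bool.not_eq_true] at h11
  simp only [h11, Bool.false_eq_true, if_false]
  by_cases h12 : PySem.Str.isIn "non_zero" ((PySem.Dict.ofList e).getD "metric" "") = true
  · simp only [h12, if_true]
  rw [Bool.not_eq_true] at h12
  simp only [h12, Bool.false_eq_true, if_false]
  by_cases h13 : PySem.Str.isIn "zero" ((PySem.Dict.ofList e).getD "metric" "") = true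
  · simp only [h13, if_true]
  rw [Bool.not_eq_true] at h13
  simp only [h13, Bool.false_eq_true, if_false]
  by_cases h14 : PySem.Str.isIn "count" ((PySem.Dict.ofList e).getD "metric" "") = true
  · simp only [h14, if_true]
  rw [Bool.not_eq_true] at h14
  simp only [h14, Bool.false_eq_true, if_false]
  by_cases h15 : PySem.Str.isIn "_" ((PySem.Dict.ofList e).getD "metric" "") = true
  · simp only [h15, if_true]
  rw [Bool.not_eq_true] at h15
  simp only [h15, Bool.false_eq_true, if_false]

-- B's first-matching-rule label equals A's cascade label
theorem pvLabel_eq (m : String) : pvLabel m = pvCascadeLabel m := by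
  unfold pvLabel pvRules pvCascadeLabel
  simp only [List.find?, List.any_cons, List.any_nil, Bool.or_false]
  by_cases h1 : (PySem.Str.isIn "active" m || PySem.Str.isIn "activity" m) = true
  · simp only [h1, if_true]
  rw [Bool.not_eq_true] at h1
  simp only [h1, Bool.false_eq_true, if_false]
  by_cases h2 : PySem.Str.isIn "min_" m = true
  · simp only [h2, if_true]
  rw [Bool.not_eq_true] at h2
  simp only [h2, Bool.false_eq_true, if_false]
  by_cases h3 : PySem.Str.isIn "profit" m = true
  · simp only [h3, if_true]
  rw [Bool.not_eq_true] at h3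
  simp only [h3, Bool.false_eq_true, if_false]
  by_cases h4 : PySem.Str.isIn "loss" m = true
  · simp only [h4, if_true]
  rw [Bool.not_eq_true] at h4
  simp only [h4, Bool.false_eq_true, if_false]
  by_cases h5 : PySem.Str.isIn "accumulation" m = true
  · simp only [h5, if_true]
  rw [Bool.not_eq_true] at h5
  simp only [h5, Bool.false_eq_true, if_false]
  by_cases h6 : PySem.Str.isIn "supply" m = true
  · simp only [h6, if_true]
  rw [Bool.not_eq_true] at h6
  simp only [h6, Bool.false_eq_true, if_false]
  by_cases h7 : PySem.Str.isIn "balance" m = true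
  · simp only [h7, if_true]
  rw [Bool.not_eq_true] at h7
  simp only [h7, Bool.false_eq_true, if_false]
  by_cases h8 : PySem.Str.isIn "holder" m = true
  · simp only [h8, if_true]
  rw [Bool.not_eq_true] at h8
  simp only [h8, Bool.false_eq_true, if_false]
  by_cases h9 : PySem.Str.isIn "sending" m = true
  · simp only [h9, if_true]
  rw [Bool.not_eq_true] at h9
  simp only [h9, Bool.false_eq_true, if_false]
  by_cases h10 : PySem.Str.isIn "receiving" m = true
  · simp only [h10, if_true]
  rw [Bool.not_eq_true] at h10
  simp only [h10, Bool.false_eq_true, if_false]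
  by_cases h11 : PySem.Str.isIn "new" m = true
  · simp only [h11, if_true]
  rw [Bool.not_eq_true] at h11
  simp only [h11, Bool.false_eq_true, if_false]
  by_cases h12 : PySem.Str.isIn "non_zero" m = true
  · simp only [h12, if_true]
  rw [Bool.not_eq_true] at h12
  simp only [h12, Bool.false_eq_true, if_false]
  by_cases h13 : PySem.Str.isIn "zero" m = true
  · simp only [h13, if_true]
  rw [Bool.not_eq_true] at h13
  simp only [h13, Bool.false_eq_true, if_false]
  by_cases h14 : PySem.Str.isIn "count" m = true
  · simp only [h14, if_true]
  rw [Bool.not_eq_true] at h14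
  simp only [h14, Bool.false_eq_true, if_false]

-- A's loop is a modify-append fold over the (label, item) pairs
theorem pvA_fold (endpoints : List (List (String × String)))
    (d : PySem.Dict String (List (List (String × String)))) :
    endpoints.foldl pvAStep d =
      (pvPairs endpoints).foldl (fun d p => d.modify p.1 [] (· ++ [p.2])) d := by
  induction endpoints generalizing d with
  | nil => rfl
  | cons e t ih =>
    simp only [pvPairs, List.map_cons, List.foldl_cons] at *
    rw [pvAStep_eq_modify]
    exact ih _

-- zipping a list with its own image lists the (element, label) pairs
theorem pvZip_map (endpoints : List (List (String × String)))
    (f : List (String × String) → String) :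
    endpoints.zip (endpoints.map f) = endpoints.map (fun e => (e, f e)) := by
  induction endpoints with
  | nil => rfl
  | cons e t ih => simp [ih]

-- ===== VERDICT (by name: the statement is the Claim_ definition above) =====
theorem group_endpoints_by_subcategory_spec : Claim_equal_group_endpoints_by_subcategory := by
  intro endpoints _
  unfold Spec_group_endpoints_by_subcategory group_endpoints_by_subcategory
    group_endpoints_by_subcategory_alt
  rw [pvA_fold]
  have hkeys : ((pvPairs endpoints).foldl
      (fun d p => d.modify p.1 [] (· ++ [p.2])) PySem.Dict.empty).keys =
      PySem.Set.ofList (endpoints.map pvKey) := by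
    rw [show (fun (d : PySem.Dict String (List (List (String × String))))
        (p : String × List (String × String)) => d.modify p.1 [] (· ++ [p.2])) =
        fun d p => d.modify (Prod.fst p) [] ((fun _ q => (· ++ [q.2])) d p) from rfl,
      PySem.Dict.keys_foldl_modify_key]
    simp [pvPairs, PySem.Dict.keys, PySem.Dict.empty, List.map_map, Function.comp_def,
      PySem.Set.ofList_eq_foldl, PySem.Set.update]
  have hnd : ((pvPairs endpoints).foldl
      (fun d p => d.modify p.1 [] (· ++ [p.2])) PySem.Dict.empty).keys.Nodup := by
    rw [hkeys]; exact PySem.Set.nodup_ofList _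
  have hlab : endpoints.map (fun e => pvLabel ((PySem.Dict.ofList e).getD "metric" "")) =
      endpoints.map pvKey := by
    simp only [pvLabel_eq]; rfl
  rw [PySem.Dict.items_eq_map_keys _ hnd [], hkeys]
  simp only [hlab, PySem.List.dedup_eq_ofList]
  refine List.map_congr_left (fun lab _ => ?_)
  have hg : ((pvPairs endpoints).foldl
      (fun d p => d.modify p.1 [] (· ++ [p.2])) PySem.Dict.empty).getD lab [] =
      ((pvPairs endpoints).filter (fun p => p.1 == lab)).map (·.2) := by
    rw [PySem.Dict.getD_foldl_modify_append]
    simp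
  rw [hg, pvZip_map]
  simp [pvPairs, pvKey, List.filter_map, List.map_map, Function.comp_def]
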